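-- pv_equiv track=rewrite | github.com/ulamai/openmath | openmath/memory/sessions.py | _session_preview
-- ===== SOURCE A (Python) =====
-- from typing import Any
--
-- def _session_preview(messages: list[dict[str, Any]]) -> str:
--     for message in reversed(messages):
--         source = str(message.get("source") or "")
--         content = str(message.get("content") or "").strip()
--         if source == "session-seed" or (
--             message.get("role") == "assistant"
--             and "is ready. This thread is stored in `.openmath/sessions/`" in content
--         ):
--             continue
--         if content:
--             compact = " ".join(content.split())
--             return compact[:157] + "..." if len(compact) > 160 else compact
--     return "New chat"
-- ===== SOURCE B (Python) =====
-- def _keep(message):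
--     """Content of a message if it counts for the preview, else None (guard-style checks)."""
--     source = str(message.get("source") or "")
--     content = str(message.get("content") or "").strip()
--     if source == "session-seed":
--         return None
--     if message.get("role") == "assistant" and "is ready. This thread is stored in `.openmath/sessions/`" in content:
--         return None
--     if not content:
--         return None
--     return content
--
--
-- def _session_preview(messages):
--     picks = [c for c in map(_keep, messages) if c is not None]
--     if not picks:
--         return "New chat"
--     compact = " ".join(picks[-1].split())
--     if len(compact) > 160:
--         return compact[:157] + "..."
--     return compact
-- ===== Notes on version B (the rewrite author's own statement) =====
-- stated objective: simpler
-- what changed: A's reverse-iteration loop with inline early-return formatting is replaced by staged passes: a guard-style helper maps each message to its content-or-None, a comprehension collects all meaningful contents in order, and the last one is formatted in a single final step.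
import Mathlib
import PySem

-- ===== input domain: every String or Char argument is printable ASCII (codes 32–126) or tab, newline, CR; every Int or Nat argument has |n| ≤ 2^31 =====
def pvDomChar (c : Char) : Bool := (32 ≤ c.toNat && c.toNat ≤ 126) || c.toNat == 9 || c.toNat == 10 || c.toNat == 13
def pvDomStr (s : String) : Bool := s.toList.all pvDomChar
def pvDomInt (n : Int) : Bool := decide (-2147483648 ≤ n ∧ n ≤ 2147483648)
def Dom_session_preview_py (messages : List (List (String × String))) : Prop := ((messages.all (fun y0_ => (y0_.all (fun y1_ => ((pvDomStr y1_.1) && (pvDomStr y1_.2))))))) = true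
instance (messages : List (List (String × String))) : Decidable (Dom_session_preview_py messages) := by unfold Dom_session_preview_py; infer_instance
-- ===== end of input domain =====

-- B replaces A's reverse loop with inline early-return formatting by staged passes:
-- collect every meaningful content in order, then format the last one; same value, no speed claim.

-- ===== PORT A =====
-- A's reverse loop with early return, as structural recursion over reversed(messages)
def pvGoA : List (List (String × String)) → String
  | [] => "New chat"
  | m :: rest =>
    let source := ((PySem.Dict.mk m).get? "source").getD ""
    let content := PySem.Str.strip (((PySem.Dict.mk m).get? "content").getD "")
    if (source == "session-seed") ||
        (((PySem.Dict.mk m).get? "role" == some "assistant") &&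
         PySem.Str.isIn "is ready. This thread is stored in `.openmath/sessions/`" content) then
      pvGoA rest
    else if content != "" then
      let compact := PySem.Str.join " " (PySem.Str.split₀ content)
      if 160 < PySem.Str.len compact then PySem.Str.slice compact none (some 157) ++ "..." else compact
    else
      pvGoA rest

def session_preview_py (messages : List (List (String × String))) : String :=
  pvGoA messages.reverse

-- ===== PORT B =====
-- helper _keep of Source B: guard-style checks, content or none
def pvKeep (m : List (String × String)) : Option String :=
  let source := ((PySem.Dict.mk m).get? "source").getD ""
  let content := PySem.Str.strip (((PySem.Dict.mk m).get? "content").getD "")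
  if source == "session-seed" then none
  else if ((PySem.Dict.mk m).get? "role" == some "assistant") &&
      PySem.Str.isIn "is ready. This thread is stored in `.openmath/sessions/`" content then none
  else if content == "" then none
  else some content

-- picks = [c for c in map(_keep, messages) if c is not None]  →  filterMap
def session_preview_py_alt (messages : List (List (String × String))) : String :=
  match (messages.filterMap pvKeep).getLast? with
  | none => "New chat"
  | some c =>
    let compact := PySem.Str.join " " (PySem.Str.split₀ c)
    if 160 < PySem.Str.len compact then PySem.Str.slice compact none (some 157) ++ "..." else compact

-- ===== PRECONDITION & SPEC =====
def Spec_session_preview_py (messages : List (List (String × String))) (out : String) : Prop := out = session_preview_py_alt messages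
instance (messages : List (List (String × String))) (out : String) : Decidable (Spec_session_preview_py messages out) := by unfold Spec_session_preview_py; infer_instance

-- ===== CLAIM (what is proved, stated in full; the proofs are below) =====
def Claim_equal_session_preview_py : Prop := ∀ (messages : List (List (String × String))), Dom_session_preview_py messages → Spec_session_preview_py messages (session_preview_py messages)

-- ===== LEMMAS AND PROOFS =====

-- shared formatting step, used only in the proofs
def pvFmt (c : String) : String :=
  let compact := PySem.Str.join " " (PySem.Str.split₀ c)
  if 160 < PySem.Str.len compact then PySem.Str.slice compact none (some 157) ++ "..." else compact

-- A's reverse loop returns the formatted first pvKeep-hit of its argument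
theorem pv_goA_eq (l : List (List (String × String))) :
    pvGoA l = (l.findSome? pvKeep).elim "New chat" pvFmt := by
  induction l with
  | nil => rfl
  | cons m t ih =>
      have hcons : List.findSome? pvKeep (m :: t)
          = (pvKeep m).or (List.findSome? pvKeep t) := by
        cases h : pvKeep m <;> simp [List.findSome?_cons, h]
      rw [hcons]
      rcases Bool.eq_false_or_eq_true
          (((PySem.Dict.mk m).get? "source").getD "" == "session-seed") with h1 | h1 <;>
      rcases Bool.eq_false_or_eq_true
          ((PySem.Dict.mk m).get? "role" == some "assistant" &&
            PySem.Str.isIn "is ready. This thread is stored in `.openmath/sessions/`"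
              (PySem.Str.strip (((PySem.Dict.mk m).get? "content").getD ""))) with h2 | h2 <;>
      rcases Bool.eq_false_or_eq_true
          (PySem.Str.strip (((PySem.Dict.mk m).get? "content").getD "") == "") with h3 | h3 <;>
      simp only [pvGoA, pvKeep, bne, h1, h2, h3, Bool.true_or, Bool.false_or,
        Bool.or_true, Bool.or_false, Bool.not_true, Bool.not_false,
        Bool.false_eq_true, if_true, if_false, ite_true, ite_false,
        Option.some_or, Option.none_or, Option.elim_some, Option.elim_none, ih] <;>
      rfl

-- last kept content of messages = first kept content of reversed messages
theorem pv_last_eq_rev_find (l : List (List (String × String))) :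
    (l.filterMap pvKeep).getLast? = l.reverse.findSome? pvKeep := by
  rw [List.getLast?_eq_head?_reverse, ← List.filterMap_reverse]
  induction l.reverse with
  | nil => rfl
  | cons m t ih =>
      cases h : pvKeep m <;> simp [List.findSome?_cons, List.filterMap_cons, h, ih]

-- ===== VERDICT (by name: the statement is the Claim_ definition above) =====
set_option maxHeartbeats 2000000 in
theorem session_preview_py_spec : Claim_equal_session_preview_py := by
  intro messages _
  unfold Spec_session_preview_py session_preview_py session_preview_py_alt
  rw [pv_last_eq_rev_find, pv_goA_eq]
  cases List.findSome? pvKeep messages.reverse <;> rfl
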